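-- pv_equiv track=rewrite | github.com/muhammadajlal/master-thesis | scripts/tools/build_mixed_dictionary.py | _is_word_like
-- ===== SOURCE A (Python) =====
-- import unicodedata
--
-- def _has_letter(s: str) -> bool:
--     return any(unicodedata.category(ch).startswith("L") for ch in s)
--
-- def _is_word_like(token: str) -> bool:
--     """Heuristic filter for dictionary tokens.
--
--     Keep strings that:
--     - contain at least one Unicode letter
--     - consist only of letters/combining-marks plus optional internal '-' or '''
--
--     This drops punctuation-only tokens like "," or "€" which appear in the news vocab.
--     """
--
--     if not token:
--         return False
--
--     def is_letter_or_mark(ch: str) -> bool: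
--         cat = unicodedata.category(ch)
--         return cat.startswith("L") or cat.startswith("M")
--
--     if not _has_letter(token):
--         return False
--
--     for i, ch in enumerate(token):
--         if is_letter_or_mark(ch):
--             continue
--         if ch in {"-", "'"}:
--             # allow only internal hyphen/apostrophe
--             if i == 0 or i == len(token) - 1:
--                 return False
--             continue
--         return False
--
--     return True
-- ===== SOURCE B (Python) =====
-- import unicodedata
--
--
-- def _is_word_like(token: str) -> bool:
--     # Split on the two permitted separators; structure checks become checks on the parts.
--     parts = token.replace("'", "-").split("-")
--     if not parts[0] or not parts[-1]:
--         # empty token, or a leading/trailing '-'/"'" (separators must be internal)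
--         return False
--     cats = [unicodedata.category(ch)[0] for part in parts for ch in part]
--     return "L" in cats and all(c in ("L", "M") for c in cats)
-- ===== Notes on version B (the rewrite author's own statement) =====
-- stated objective: alternative
-- what changed: Instead of a per-character enumerate/index loop, B splits the token on '-'/apostrophe into parts, rejects an empty first or last part (separators must be internal), and then tests the category initials of the characters collected across all parts.
import Mathlib
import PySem

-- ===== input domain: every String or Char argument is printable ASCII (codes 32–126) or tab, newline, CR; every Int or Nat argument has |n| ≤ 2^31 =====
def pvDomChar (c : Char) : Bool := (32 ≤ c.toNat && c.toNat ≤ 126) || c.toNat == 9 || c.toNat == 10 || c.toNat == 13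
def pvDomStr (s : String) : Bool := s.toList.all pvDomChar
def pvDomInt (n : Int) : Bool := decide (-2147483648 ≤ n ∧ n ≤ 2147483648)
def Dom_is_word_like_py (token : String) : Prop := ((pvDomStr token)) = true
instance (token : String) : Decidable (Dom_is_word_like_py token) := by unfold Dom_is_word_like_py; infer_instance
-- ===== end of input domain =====

-- B replaces A's per-character enumerate/index loop by splitting the token on '-'/''' into parts and
-- testing the parts (objective: alternative decomposition).
-- ===== PORT A =====
-- unicodedata.category(ch) starts with "L"/"M": on the printable-ASCII domain, letters are exactly Char.isAlpha and no marks occur.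
def pvAIsLM (ch : Char) : Bool := ch.isAlpha

def pvHasLetter (s : List Char) : Bool := s.any (fun ch => ch.isAlpha)

-- the 'for i, ch in enumerate(token)' loop with its early returns
def pvALoop (n : Int) : List (Int × Char) → Bool
  | [] => true
  | (i, ch) :: rest =>
    if pvAIsLM ch then pvALoop n rest
    else if ch = '-' || ch = '\'' then
      (if i = 0 || i = n - 1 then false else pvALoop n rest)
    else false

def is_word_like_py (token : String) : Bool :=
  let l := token.toList
  if l.isEmpty then false
  else if !pvHasLetter l then false
  else pvALoop l.length (PySem.List.enumerate l)

-- ===== PORT B =====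
-- unicodedata.category(ch)[0] on printable ASCII: letters are 'L'; no ASCII char is a combining mark;
-- every other ASCII char has a category initial that is neither 'L' nor 'M' — written 'Z' here
-- (only membership in {'L','M'} and equality with 'L' are ever inspected, so this is exact on the domain).
def pvCat0 (ch : Char) : Char := if ch.isAlpha then 'L' else 'Z'

def is_word_like_py_alt (token : String) : Bool :=
  let parts := PySem.Chars.splitOn (PySem.Chars.replace token.toList ['\''] ['-']) ['-']
  if (PySem.List.pyGetD parts 0 []).isEmpty || (PySem.List.pyGetD parts (-1) []).isEmpty then
    false
  else
    let cats := (parts.flatMap (fun part => part)).map pvCat0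
    cats.contains 'L' && cats.all (fun c => c == 'L' || c == 'M')

-- ===== PRECONDITION & SPEC =====
def Spec_is_word_like_py (token : String) (out : Bool) : Prop := out = is_word_like_py_alt token
instance (token : String) (out : Bool) : Decidable (Spec_is_word_like_py token out) := by unfold Spec_is_word_like_py; infer_instance

-- ===== CLAIM (what is proved, stated in full; the proofs are below) =====
def Claim_equal_is_word_like_py : Prop := ∀ (token : String), Dom_is_word_like_py token → Spec_is_word_like_py token (is_word_like_py token)

-- ===== LEMMAS AND PROOFS =====

-- the separator substitution token.replace("'", "-") performs, char by char
def pvSubst (x : Char) : Char := if x = '\'' then '-' else x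

-- the common propositional shape of both programs on the ASCII domain
def pvQ (l : List Char) : Prop :=
  l ≠ [] ∧ (∀ ch ∈ l, ch.isAlpha = true ∨ ch = '-' ∨ ch = '\'') ∧ (∃ ch ∈ l, ch.isAlpha = true) ∧
    l.headD '-' ∉ ['-', '\''] ∧ l.getLastD '-' ∉ ['-', '\'']

-- ---- small list utilities ----
theorem pvGetLastD_congr {α : Type} (l : List α) (h : l ≠ []) (d d' : α) :
    l.getLastD d = l.getLastD d' := by
  rw [List.getLastD_eq_getLast?, List.getLastD_eq_getLast?, List.getLast?_eq_getLast h]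
  rfl

theorem pvGetLast_eq_getLastD {α : Type} (l : List α) (h : l ≠ []) (d : α) :
    l.getLast h = l.getLastD d := by
  rw [List.getLastD_eq_getLast?, List.getLast?_eq_getLast h]
  rfl

theorem pvGetLastD_map {α β : Type} (f : α → β) (l : List α) (d : α) :
    (l.map f).getLastD (f d) = f (l.getLastD d) := by
  rw [List.getLastD_eq_getLast?, List.getLastD_eq_getLast?, List.getLast?_map]
  cases l.getLast? <;> rfl

-- ---- replace with single-char old/new is a map ----
theorem pv_replace_go (c d : Char) (l : List Char) : ∀ (fuel : Nat) (acc : List Char), l.length ≤ fuel →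
    PySem.Chars.replace.go [c] [d] fuel l acc
      = acc.reverse ++ l.map (fun x => if x = c then d else x) := by
  induction l with
  | nil => intro fuel acc _; cases fuel <;> simp [PySem.Chars.replace.go]
  | cons x t ih =>
    intro fuel acc hf
    cases fuel with
    | zero => simp at hf
    | succ f =>
      simp only [List.length_cons, Nat.succ_le_succ_iff] at hf
      by_cases hx : x = c
      · subst hx
        have hp : [x].isPrefixOf (x :: t) = true := by simp [List.isPrefixOf]
        simp only [PySem.Chars.replace.go, hp, if_pos, List.length_cons, List.length_nil,
          List.drop_succ_cons, List.drop_zero]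
        rw [ih f _ hf]
        simp
      · have hp : [c].isPrefixOf (x :: t) = false := by
          simp [List.isPrefixOf]
          exact fun h => absurd h.symm hx
        simp only [PySem.Chars.replace.go, hp, Bool.false_eq_true, if_false]
        rw [ih f _ hf]
        simp [hx]

theorem pv_replace_single (c d : Char) (l : List Char) :
    PySem.Chars.replace l [c] [d] = l.map (fun x => if x = c then d else x) := by
  simp only [PySem.Chars.replace, List.isEmpty_cons, Bool.false_eq_true, if_false]
  simpa using pv_replace_go c d l l.length [] (le_refl _)

-- ---- splitOn with a single-char separator, as a structural recursion ----
def pvSplit1 (c : Char) : List Char → List (List Char)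
  | [] => [[]]
  | x :: xs => if x = c then [] :: pvSplit1 c xs else (pvSplit1 c xs).modifyHead (fun p => x :: p)

theorem pvSplit1_ne_nil (c : Char) (l : List Char) : pvSplit1 c l ≠ [] := by
  induction l with
  | nil => simp [pvSplit1]
  | cons x xs ih =>
    simp only [pvSplit1]
    split
    · simp
    · cases h : pvSplit1 c xs with
      | nil => exact absurd h ih
      | cons p ps => simp [List.modifyHead]

theorem pv_splitOn_go (c : Char) (l : List Char) : ∀ (fuel : Nat) (cur : List Char) (acc : List (List Char)),
    l.length ≤ fuel →
    PySem.Chars.splitOn.go [c] fuel l cur acc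
      = acc.reverse ++ (pvSplit1 c l).modifyHead (fun p => cur.reverse ++ p) := by
  induction l with
  | nil => intro fuel cur acc _; cases fuel <;> simp [PySem.Chars.splitOn.go, pvSplit1, List.modifyHead]
  | cons x t ih =>
    intro fuel cur acc hf
    cases fuel with
    | zero => simp at hf
    | succ f =>
      simp only [List.length_cons, Nat.succ_le_succ_iff] at hf
      by_cases hx : x = c
      · subst hx
        have hp : [x].isPrefixOf (x :: t) = true := by simp [List.isPrefixOf]
        simp only [PySem.Chars.splitOn.go, hp, if_pos, List.length_cons, List.length_nil,
          List.drop_succ_cons, List.drop_zero]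
        rw [ih f [] _ hf]
        cases h : pvSplit1 x t with
        | nil => exact absurd h (pvSplit1_ne_nil x t)
        | cons p ps =>
          simp [pvSplit1, h, List.modifyHead]
      · have hp : [c].isPrefixOf (x :: t) = false := by
          simp [List.isPrefixOf]
          exact fun h => absurd h.symm hx
        simp only [PySem.Chars.splitOn.go, hp, Bool.false_eq_true, if_false]
        rw [ih f (x :: cur) acc hf]
        cases h : pvSplit1 c t with
        | nil => exact absurd h (pvSplit1_ne_nil c t)
        | cons p ps =>
          simp [pvSplit1, hx, h, List.modifyHead]

theorem pv_splitOn_single (c : Char) (l : List Char) :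
    PySem.Chars.splitOn l [c] = pvSplit1 c l := by
  unfold PySem.Chars.splitOn
  rw [pv_splitOn_go c l (l.length + 1) [] [] (by omega)]
  cases h : pvSplit1 c l with
  | nil => exact absurd h (pvSplit1_ne_nil c l)
  | cons p ps => simp [List.modifyHead]

-- ---- facts about pvSplit1 used to read B's part tests back on the token ----
theorem pvSplit1_headD (c : Char) (l : List Char) :
    (pvSplit1 c l).headD [] = l.takeWhile (fun x => x != c) := by
  induction l with
  | nil => simp [pvSplit1]
  | cons x t ih =>
    by_cases hx : x = c
    · subst hx; simp [pvSplit1]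
    · cases h : pvSplit1 c t with
      | nil => exact absurd h (pvSplit1_ne_nil c t)
      | cons p ps =>
        simp only [pvSplit1, hx, if_false, h, List.modifyHead, List.takeWhile_cons]
        simp only [h, List.headD_cons] at ih
        simp [hx, ih]

theorem pvSplit1_singleton (c : Char) (l : List Char) (p : List Char)
    (h : pvSplit1 c l = [p]) : c ∉ l := by
  induction l generalizing p with
  | nil => simp
  | cons x t ih =>
    by_cases hx : x = c
    · subst hx
      simp only [pvSplit1, if_pos] at h
      cases hs : pvSplit1 x t with
      | nil => exact absurd hs (pvSplit1_ne_nil x t)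
      | cons q qs => rw [hs] at h; simp at h
    · simp only [pvSplit1, hx, if_false] at h
      cases hs : pvSplit1 c t with
      | nil => exact absurd hs (pvSplit1_ne_nil c t)
      | cons q qs =>
        rw [hs] at h
        simp only [List.modifyHead] at h
        cases h' : qs with
        | cons _ _ => rw [h'] at h; simp at h
        | nil =>
          rw [h'] at h hs
          simp only [List.mem_cons]
          rintro (rfl | hm)
          · exact hx rfl
          · exact ih q hs hm

theorem pvSplit1_last_empty (c : Char) (l : List Char) :
    ((pvSplit1 c l).getLastD [] = []) ↔ (∀ h : l ≠ [], l.getLast h = c) := by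
  induction l with
  | nil => simp [pvSplit1]
  | cons x t ih =>
    by_cases hx : x = c
    · simp only [pvSplit1, if_pos hx, List.getLastD_cons]
      rw [ih]
      cases ht : t with
      | nil =>
        subst ht
        simp [hx]
      | cons y u =>
        subst ht
        constructor
        · intro hl h
          rw [List.getLast_cons (by simp)]
          exact hl (by simp)
        · intro hl h
          have := hl (by simp)
          rwa [List.getLast_cons (by simp)] at this
    · cases hs : pvSplit1 c t with
      | nil => exact absurd hs (pvSplit1_ne_nil c t)
      | cons p ps =>
        simp only [pvSplit1, if_neg hx, hs, List.modifyHead, List.getLastD_cons]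
        cases hps : ps with
        | nil =>
          have hnc : c ∉ t := pvSplit1_singleton c t p (by rw [hs, hps])
          simp only [List.getLastD_nil]
          constructor
          · intro h; simp at h
          · intro hl
            exfalso
            cases ht : t with
            | nil =>
              subst ht
              have := hl (by simp)
              simp at this
              exact hx this
            | cons y u =>
              subst ht
              have := hl (by simp)
              rw [List.getLast_cons (by simp)] at this
              exact hnc (this ▸ List.getLast_mem _)
        | cons q qs =>
          subst hps
          have htne : t ≠ [] := by
            intro h; subst h; simp [pvSplit1] at hs
          have h1 : ((q :: qs).getLastD (x :: p)) = ((q :: qs).getLastD p) :=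
            pvGetLastD_congr _ (by simp) _ _
          have h2 : ((p :: q :: qs).getLastD []) = ((q :: qs).getLastD p) := List.getLastD_cons
          rw [h1, ← h2, ← hs, ih]
          constructor
          · intro hl h
            rw [List.getLast_cons htne]
            exact hl htne
          · intro hl h
            have := hl (by simp)
            rwa [List.getLast_cons htne] at this

theorem pvSplit1_flatten (c : Char) (l : List Char) :
    (pvSplit1 c l).flatMap (fun part => part) = l.filter (fun x => x != c) := by
  induction l with
  | nil => simp [pvSplit1]
  | cons x t ih =>
    by_cases hx : x = c
    · subst hx; simp [pvSplit1, ih]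
    · cases hs : pvSplit1 c t with
      | nil => exact absurd hs (pvSplit1_ne_nil c t)
      | cons p ps =>
        rw [hs] at ih
        simp only [pvSplit1, hx, if_false, hs, List.modifyHead, List.flatMap_cons,
          List.filter_cons] at ih ⊢
        simp [hx, ← ih]

-- ---- per-character bridges between B's category tests and the A-side predicates ----
theorem pvSubst_alpha (x : Char) : (pvSubst x).isAlpha = x.isAlpha := by
  by_cases h : x = '\'' <;> simp [pvSubst, h]

theorem pvSubst_eq_dash (x : Char) : (pvSubst x = '-') ↔ (x = '-' ∨ x = '\'') := by
  by_cases h : x = '\'' <;> simp [pvSubst, h]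

theorem pvCat0_eq_L (x : Char) : (pvCat0 x = 'L') ↔ x.isAlpha = true := by
  by_cases hx : x.isAlpha = true <;> simp [pvCat0, hx]

theorem pvCat0_LM (x : Char) : (pvCat0 x = 'L' ∨ pvCat0 x = 'M') ↔ x.isAlpha = true := by
  by_cases hx : x.isAlpha = true <;> simp [pvCat0, hx]

theorem pv_chr1 (ch : Char) :
    ((pvSubst ch != '-') = true ∧ pvCat0 (pvSubst ch) = 'L') ↔ ch.isAlpha = true := by
  rw [pvCat0_eq_L, pvSubst_alpha]
  constructor
  · exact And.right
  · intro h
    refine ⟨?_, h⟩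
    simp only [bne_iff_ne, ne_eq]
    intro hEq
    have := pvSubst_alpha ch
    rw [hEq] at this
    rw [← this] at h
    exact absurd h (by decide)

theorem pv_chr2 (ch : Char) :
    ((pvSubst ch != '-') = true → (pvCat0 (pvSubst ch) = 'L' ∨ pvCat0 (pvSubst ch) = 'M')) ↔
      (ch.isAlpha = true ∨ ch = '-' ∨ ch = '\'') := by
  by_cases hs : ch = '-' ∨ ch = '\''
  · have hd : pvSubst ch = '-' := (pvSubst_eq_dash ch).2 hs
    simp [hd, hs]
  · have hns : pvSubst ch ≠ '-' := fun h => hs ((pvSubst_eq_dash ch).1 h)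
    push Not at hs
    rw [pvCat0_LM, pvSubst_alpha]
    simp [hns, hs.1, hs.2]

-- ---- B's three part-level tests, read on the original token ----
theorem pv_first_ok (c : Char) (rest : List Char) :
    ((List.takeWhile (fun x => x != '-') (List.map pvSubst (c :: rest))).isEmpty = false) ↔
      (c ∉ ['-', '\'']) := by
  by_cases hd : pvSubst c = '-'
  · have hc := (pvSubst_eq_dash c).1 hd
    have hb : (pvSubst c != '-') = false := by simp [hd]
    simp only [List.map_cons, List.takeWhile_cons, hb, Bool.false_eq_true, if_false,
      List.isEmpty_nil]
    constructor
    · intro h; simp at h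
    · intro hno; exact absurd (List.mem_pair.2 hc) hno
  · constructor
    · intro _ hmem
      exact hd ((pvSubst_eq_dash c).2 (by simpa using hmem))
    · intro _
      simp [hd]

theorem pv_last_ok (c : Char) (rest : List Char) :
    (((pvSplit1 '-' (List.map pvSubst (c :: rest))).getLastD []).isEmpty = false) ↔
      ((c :: rest).getLastD '-' ∉ ['-', '\'']) := by
  have hmapne : List.map pvSubst (c :: rest) ≠ [] := by simp
  have hmap : (List.map pvSubst (c :: rest)).getLastD '-' = pvSubst ((c :: rest).getLastD '-') := by
    have h := pvGetLastD_map pvSubst (c :: rest) '-'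
    rwa [show pvSubst '-' = '-' from rfl] at h
  constructor
  · intro h hmem
    have hne : ¬ ((pvSplit1 '-' (List.map pvSubst (c :: rest))).getLastD [] = []) := by
      intro h'
      rw [h'] at h
      simp at h
    rw [pvSplit1_last_empty] at hne
    apply hne
    intro hne'
    rw [pvGetLast_eq_getLastD _ hne' '-', hmap]
    exact (pvSubst_eq_dash _).2 (by simpa using hmem)
  · intro h
    rw [Bool.eq_false_iff, ne_eq, List.isEmpty_iff, pvSplit1_last_empty]
    intro hall
    have := hall hmapne
    rw [pvGetLast_eq_getLastD _ hmapne '-', hmap] at this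
    exact h (by simpa using (pvSubst_eq_dash _).1 this)

theorem pv_contains (l : List Char) :
    ((((pvSplit1 '-' (List.map pvSubst l)).flatMap (fun part => part)).map pvCat0).contains 'L' = true) ↔
      (∃ ch ∈ l, ch.isAlpha = true) := by
  rw [pvSplit1_flatten]
  simp only [List.contains_eq_mem, List.mem_map, List.mem_filter, decide_eq_true_eq]
  constructor
  · rintro ⟨x, ⟨⟨ch, hch, rfl⟩, hbne⟩, hcat⟩
    exact ⟨ch, hch, (pv_chr1 ch).1 ⟨hbne, hcat⟩⟩
  · rintro ⟨ch, hch, ha⟩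
    obtain ⟨h1, h2⟩ := (pv_chr1 ch).2 ha
    exact ⟨pvSubst ch, ⟨⟨ch, hch, rfl⟩, h1⟩, h2⟩

theorem pv_all (l : List Char) :
    ((((pvSplit1 '-' (List.map pvSubst l)).flatMap (fun part => part)).map pvCat0).all
        (fun x => x == 'L' || x == 'M') = true) ↔
      (∀ ch ∈ l, ch.isAlpha = true ∨ ch = '-' ∨ ch = '\'') := by
  rw [pvSplit1_flatten, List.all_eq_true]
  constructor
  · intro h ch hch
    refine (pv_chr2 ch).1 ?_
    intro hbne
    have hmem : pvCat0 (pvSubst ch) ∈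
        (List.map pvCat0 (List.filter (fun x => x != '-') (List.map pvSubst l))) := by
      apply List.mem_map_of_mem
      rw [List.mem_filter]
      exact ⟨List.mem_map_of_mem hch, hbne⟩
    have := h _ hmem
    simpa using this
  · intro h x hx
    obtain ⟨y, hy, rfl⟩ := List.mem_map.1 hx
    rw [List.mem_filter] at hy
    obtain ⟨hym, hybne⟩ := hy
    obtain ⟨ch, hch, rfl⟩ := List.mem_map.1 hym
    have := (pv_chr2 ch).2 (h ch hch) hybne
    simpa using this

-- ---- A's loop is the position-constrained all ----
theorem pvALoop_eq_all (n : Int) (l : List (Int × Char)) :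
    pvALoop n l
      = l.all (fun p => pvAIsLM p.2 || ((p.2 = '-' || p.2 = '\'') && !(decide (p.1 = 0) || decide (p.1 = n - 1)))) := by
  induction l with
  | nil => rfl
  | cons hd tl ih =>
    obtain ⟨i, ch⟩ := hd
    simp only [pvALoop, List.all_cons, ih]
    by_cases h1 : pvAIsLM ch <;> by_cases h2 : ch = '-' ∨ ch = '\'' <;>
      by_cases h3 : i = 0 ∨ i = n - 1 <;> simp_all
    all_goals tauto

-- ---- A ↔ pvQ ----
theorem pvA_iff (token : String) : is_word_like_py token = true ↔ pvQ token.toList := by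
  unfold is_word_like_py pvQ
  cases hl : token.toList with
  | nil => simp
  | cons c rest =>
    simp only [List.isEmpty_cons, Bool.false_eq_true, if_false]
    rw [pvALoop_eq_all]
    have hlast : (c :: rest).getLast (by simp) = (c :: rest)[(c :: rest).length - 1]'(by simp) :=
      List.getLast_eq_getElem _
    constructor
    · intro h
      have hany : pvHasLetter (c :: rest) = true := by
        by_contra hn
        simp only [Bool.not_eq_true] at hn
        rw [if_pos (by simp [hn])] at h
        exact absurd h (by simp)
      rw [if_neg (by simp [hany])] at h
      simp only [List.all_eq_true] at h
      have hidx : ∀ (k : Nat) (hk : k < (c :: rest).length),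
          (pvAIsLM (c :: rest)[k] ||
            (((c :: rest)[k] = '-' || (c :: rest)[k] = '\'') &&
              !(decide ((0 : Int) + k = 0) || decide ((0 : Int) + k = ((c :: rest).length : Int) - 1)))) = true := by
        intro k hk
        exact h _ ((PySem.List.mem_enumerate_iff _ _ _).2 ⟨k, hk, rfl⟩)
      have hlen : 0 < (c :: rest).length := by simp
      have hc : pvAIsLM c = true := by simpa using hidx 0 (by simp)
      have hL : pvAIsLM ((c :: rest).getLast (by simp)) = true := by
        rw [hlast]
        have he : ((0 : Int) + ((c :: rest).length - 1 : Nat) = ((c :: rest).length : Int) - 1) := by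
          push_cast [Nat.cast_sub hlen]; ring
        simpa [he] using hidx ((c :: rest).length - 1) (by omega)
      refine ⟨by simp, ?_, ?_, ?_, ?_⟩
      · intro ch hch
        obtain ⟨k, hk, rfl⟩ := List.mem_iff_getElem.1 hch
        have := hidx k hk
        simp only [pvAIsLM, Bool.or_eq_true, Bool.and_eq_true, decide_eq_true_eq] at this
        tauto
      · simp only [pvHasLetter, List.any_eq_true] at hany
        obtain ⟨ch, hm, ha⟩ := hany
        exact ⟨ch, hm, ha⟩
      · simp only [List.headD_cons]
        intro hmem
        have hcc : c = '-' ∨ c = '\'' := by simpa using hmem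
        rcases hcc with h' | h' <;> rw [h'] at hc <;> exact absurd hc (by decide)
      · have hg : (c :: rest).getLastD '-' = (c :: rest).getLast (by simp) :=
          (pvGetLast_eq_getLastD _ (by simp) '-').symm
        rw [hg]
        intro hmem
        have hcc := (List.mem_pair.1 hmem)
        rcases hcc with h' | h' <;> rw [h'] at hL <;> exact absurd hL (by decide)
    · rintro ⟨-, hall, ⟨ch, hm, ha⟩, hhead, hlastq⟩
      have hany : pvHasLetter (c :: rest) = true := by
        simp only [pvHasLetter, List.any_eq_true]
        exact ⟨ch, hm, ha⟩
      rw [if_neg (by simp [hany])]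
      simp only [List.all_eq_true]
      intro x hx
      obtain ⟨k, hk, rfl⟩ := (PySem.List.mem_enumerate_iff _ _ _).1 hx
      have hmemk : (c :: rest)[k] ∈ (c :: rest) := List.getElem_mem hk
      have hcases := hall _ hmemk
      by_cases halpha : ((c :: rest)[k]).isAlpha = true
      · simp [pvAIsLM, halpha]
      · have hsep : (c :: rest)[k] = '-' ∨ (c :: rest)[k] = '\'' := by tauto
        have hk0 : k ≠ 0 := by
          intro hke; subst hke
          simp only [List.getElem_cons_zero] at hsep
          simp only [List.headD_cons] at hhead
          exact hhead (by rcases hsep with h' | h' <;> simp [h'])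
        have hkL : k ≠ (c :: rest).length - 1 := by
          intro hke
          subst hke
          have hg : (c :: rest).getLastD '-' = (c :: rest)[(c :: rest).length - 1]'(by simp) := by
            rw [← hlast]
            exact (pvGetLast_eq_getLastD _ (by simp) '-').symm
          rw [hg] at hlastq
          exact hlastq (List.mem_pair.2 hsep)
        have h0 : ¬ ((0 : Int) + k = 0) := by omega
        have h1 : ¬ ((0 : Int) + k = ((c :: rest).length : Int) - 1) := by
          have hklt : k < (c :: rest).length := hk
          omega
        simp only [h0, h1, decide_false, Bool.or_false, Bool.not_false, Bool.and_true]
        simp [pvAIsLM, hsep, halpha]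

-- ---- B ↔ pvQ ----
theorem pvB_iff (token : String) : is_word_like_py_alt token = true ↔ pvQ token.toList := by
  unfold is_word_like_py_alt pvQ
  rw [pv_replace_single, pv_splitOn_single]
  have hsubst : (fun x => if x = '\'' then '-' else x) = pvSubst := by
    funext x; simp [pvSubst]
  rw [hsubst]
  cases hl : token.toList with
  | nil =>
    simp [pvSplit1, PySem.List.pyGetD_zero]
  | cons c rest =>
    have hpne := pvSplit1_ne_nil '-' (List.map pvSubst (c :: rest))
    have hhead : PySem.List.pyGetD (pvSplit1 '-' (List.map pvSubst (c :: rest))) 0 []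
        = List.takeWhile (fun x => x != '-') (List.map pvSubst (c :: rest)) := by
      rw [PySem.List.pyGetD_zero, ← pvSplit1_headD]
      cases hp : pvSplit1 '-' (List.map pvSubst (c :: rest)) with
      | nil => exact absurd hp hpne
      | cons p ps => simp
    have hlastp : PySem.List.pyGetD (pvSplit1 '-' (List.map pvSubst (c :: rest))) (-1) []
        = (pvSplit1 '-' (List.map pvSubst (c :: rest))).getLastD [] := by
      rw [PySem.List.pyGetD_neg_one _ _ hpne]
      exact pvGetLast_eq_getLastD _ hpne []
    constructor
    · intro h
      by_cases hcond : ((PySem.List.pyGetD (pvSplit1 '-' (List.map pvSubst (c :: rest))) 0 []).isEmpty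
          || (PySem.List.pyGetD (pvSplit1 '-' (List.map pvSubst (c :: rest))) (-1) []).isEmpty) = true
      · rw [if_pos hcond] at h
        exact absurd h (by simp)
      · rw [if_neg hcond] at h
        simp only [Bool.or_eq_true, not_or, Bool.not_eq_true] at hcond
        obtain ⟨h1, h2⟩ := hcond
        rw [hhead] at h1
        rw [hlastp] at h2
        rw [Bool.and_eq_true] at h
        refine ⟨by simp, (pv_all (c :: rest)).1 h.2, (pv_contains (c :: rest)).1 h.1, ?_, (pv_last_ok c rest).1 h2⟩
        simpa using (pv_first_ok c rest).1 h1
    · rintro ⟨-, hall, hex, hh, hlq⟩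
      have h1 : (List.takeWhile (fun x => x != '-') (List.map pvSubst (c :: rest))).isEmpty = false :=
        (pv_first_ok c rest).2 (by simpa using hh)
      have h2 := (pv_last_ok c rest).2 hlq
      simp only [List.map_cons] at hhead hlastp h1 h2
      rw [if_neg (by simp only [List.map_cons]; rw [hhead, hlastp, h1, h2]; simp)]
      rw [Bool.and_eq_true]
      exact ⟨(pv_contains (c :: rest)).2 hex, (pv_all (c :: rest)).2 hall⟩

-- ===== VERDICT (by name: the statement is the Claim_ definition above) =====
theorem is_word_like_py_spec : Claim_equal_is_word_like_py := by
  intro token _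
  unfold Spec_is_word_like_py
  have ha := pvA_iff token
  have hb := pvB_iff token
  cases h1 : is_word_like_py token <;> cases h2 : is_word_like_py_alt token <;> simp_all
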